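-- pv_equiv track=rewrite | github.com/markielock/math-drills | Math programs/Fraction.py | find_common_multiples
-- ===== SOURCE A (Python) =====
-- def find_common_multiples(number):
--     common_multiples = [1]
--     table = 2
--     while table < 12:
--         for num in range(10 + 1):
--             temp = num * table
--             if temp == number:
--                 common_multiples.append(table)
--         table += 1
--     return common_multiples
-- ===== SOURCE B (Python) =====
-- def find_common_multiples(number):
--     return [1] + [t for t in range(2, 12) if number % t == 0 and 0 <= number // t <= 10]
-- ===== Notes on version B (the rewrite author's own statement) =====
-- stated objective: simpler
-- what changed: Replaces the nested search over all products num*table (num in 0..10) by a single pass over table in 2..11 with a direct divisibility and quotient-range test.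
import Mathlib
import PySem

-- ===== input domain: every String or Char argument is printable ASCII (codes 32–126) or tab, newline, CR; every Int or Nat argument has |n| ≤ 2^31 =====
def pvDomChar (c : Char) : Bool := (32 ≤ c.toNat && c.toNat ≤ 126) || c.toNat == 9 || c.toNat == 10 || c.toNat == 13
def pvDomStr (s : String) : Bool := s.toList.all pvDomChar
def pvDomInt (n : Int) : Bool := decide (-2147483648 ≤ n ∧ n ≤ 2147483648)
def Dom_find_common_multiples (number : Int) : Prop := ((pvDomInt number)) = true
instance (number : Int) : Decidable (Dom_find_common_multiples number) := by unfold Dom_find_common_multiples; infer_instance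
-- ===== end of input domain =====

-- B replaces A's nested search for a multiple num*table by one pass with a direct
-- divisibility and quotient-range test (objective: simpler).

-- ===== PORT A =====
def find_common_multiples (number : Int) : List Int :=
  (PySem.List.pyRange 2 12 1).foldl (fun acc table =>
    (PySem.List.pyRange 0 (10 + 1) 1).foldl (fun acc2 num =>
      let temp := num * table
      if temp = number then acc2 ++ [table] else acc2) acc) [1]

-- ===== PORT B =====
def find_common_multiples_alt (number : Int) : List Int :=
  [1] ++ (PySem.List.pyRange 2 12 1).filter (fun t =>
    decide (PySem.Int.mod number t = 0 ∧ 0 ≤ PySem.Int.floordiv number t ∧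
            PySem.Int.floordiv number t ≤ 10))

-- ===== PRECONDITION & SPEC =====
def Spec_find_common_multiples (number : Int) (out : List Int) : Prop := out = find_common_multiples_alt number
instance (number : Int) (out : List Int) : Decidable (Spec_find_common_multiples number out) := by unfold Spec_find_common_multiples; infer_instance

-- ===== CLAIM (what is proved, stated in full; the proofs are below) =====
def Claim_equal_find_common_multiples : Prop := ∀ (number : Int), Dom_find_common_multiples number → Spec_find_common_multiples number (find_common_multiples number)

-- ===== LEMMAS AND PROOFS =====

-- A's inner loop appends `t` exactly once iff some element of L satisfies q * t = n
-- (at most one can, since t ≠ 0 and L has no duplicates).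
lemma pv_inner_fold (t n : Int) (ht : t ≠ 0) :
    ∀ (L : List Int) (acc : List Int), L.Nodup →
    L.foldl (fun a q => if q * t = n then a ++ [t] else a) acc
      = acc ++ (if ∃ q ∈ L, q * t = n then [t] else []) := by
  intro L
  induction L with
  | nil => intro acc _; simp
  | cons q rest ih =>
    intro acc hnd
    have hnd' := hnd.of_cons
    simp only [List.foldl_cons]
    by_cases h : q * t = n
    · rw [if_pos h, ih _ hnd']
      have hrest : ¬ ∃ r ∈ rest, r * t = n := by
        rintro ⟨r, hr, hrn⟩
        have : r = q := mul_right_cancel₀ ht (hrn.trans h.symm)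
        exact (List.nodup_cons.mp hnd).1 (this ▸ hr)
      rw [if_neg hrest, if_pos ⟨q, List.mem_cons_self, h⟩]
      simp
    · rw [if_neg h, ih _ hnd']
      congr 1
      refine if_congr ?_ rfl rfl
      constructor
      · rintro ⟨r, hr, hrn⟩; exact ⟨r, List.mem_cons_of_mem _ hr, hrn⟩
      · rintro ⟨r, hr, hrn⟩
        rcases List.mem_cons.mp hr with rfl | hr'
        · exact absurd hrn h
        · exact ⟨r, hr', hrn⟩

-- The existence of a multiplier in 0..10 is exactly B's divisibility + quotient-range test.
lemma pv_cond_iff (n t : Int) (ht : 0 < t) :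
    (∃ q ∈ PySem.List.pyRange 0 (10 + 1) 1, q * t = n) ↔
      (PySem.Int.mod n t = 0 ∧ 0 ≤ PySem.Int.floordiv n t ∧ PySem.Int.floordiv n t ≤ 10) := by
  rw [PySem.Int.mod_eq_emod_of_pos ht, PySem.Int.floordiv_eq_ediv_of_pos ht]
  constructor
  · rintro ⟨q, hq, rfl⟩
    have hq' := (PySem.List.mem_pyRange_one).mp hq
    refine ⟨Int.mul_emod_left q t, ?_, ?_⟩
    · rw [Int.mul_ediv_cancel _ ht.ne']; omega
    · rw [Int.mul_ediv_cancel _ ht.ne']; omega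
  · rintro ⟨hm, h0, h10⟩
    refine ⟨n / t, (PySem.List.mem_pyRange_one).mpr ⟨h0, by omega⟩, ?_⟩
    exact Int.ediv_mul_cancel (Int.dvd_of_emod_eq_zero hm)

-- One outer step of A equals appending one filter cell of B.
lemma pv_step (n t : Int) (ht : 0 < t) (acc : List Int) :
    (PySem.List.pyRange 0 (10 + 1) 1).foldl (fun a q => if q * t = n then a ++ [t] else a) acc
      = acc ++ (if PySem.Int.mod n t = 0 ∧ 0 ≤ PySem.Int.floordiv n t ∧
                   PySem.Int.floordiv n t ≤ 10 then [t] else []) := by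
  rw [pv_inner_fold t n ht.ne' _ acc (PySem.List.nodup_pyRange_one 0 (10+1))]
  congr 1
  exact if_congr (pv_cond_iff n t ht) rfl rfl

-- A's whole outer loop is B's filter, for any list of positive tables.
lemma pv_outer (n : Int) :
    ∀ (L : List Int), (∀ t ∈ L, 0 < t) → ∀ (acc : List Int),
    L.foldl (fun acc table =>
        (PySem.List.pyRange 0 (10 + 1) 1).foldl
          (fun a q => if q * table = n then a ++ [table] else a) acc) acc
      = acc ++ L.filter (fun t =>
          decide (PySem.Int.mod n t = 0 ∧ 0 ≤ PySem.Int.floordiv n t ∧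
                  PySem.Int.floordiv n t ≤ 10)) := by
  intro L
  induction L with
  | nil => intro _ acc; simp
  | cons t rest ih =>
    intro hpos acc
    have ht : 0 < t := hpos t List.mem_cons_self
    simp only [List.foldl_cons]
    rw [pv_step n t ht, ih (fun r hr => hpos r (List.mem_cons_of_mem _ hr))]
    simp only [List.filter_cons, decide_eq_true_eq]
    split_ifs <;> simp

-- ===== VERDICT (by name: the statement is the Claim_ definition above) =====
theorem find_common_multiples_spec : Claim_equal_find_common_multiples := by
  intro n _
  show find_common_multiples n = find_common_multiples_alt n
  exact pv_outer n (PySem.List.pyRange 2 12 1)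
    (fun t ht => by have := (PySem.List.mem_pyRange_one).mp ht; omega) [1]
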